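-- pv_equiv track=rewrite | github.com/MrZelus/BazarDrive | tools/system_health_dashboard.py | needs_permissions_sync
-- ===== SOURCE A (Python) =====
-- def needs_permissions_sync(files: list[str]) -> bool:
--     sensitive = any(
--         f.startswith("app/services/driver_compliance")
--         or f.startswith("app/api/http_handlers.py")
--         or "permissions" in f
--         or "driver_documents" in f
--         for f in files
--     )
--     touches_permissions = any(f == "docs/security/permissions_matrix.md" for f in files)
--     return sensitive and not touches_permissions
-- ===== SOURCE B (Python) =====
-- def needs_permissions_sync(files: list[str]) -> bool:
--     # single pass with early exit: the permissions matrix file makes the result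
--     # False regardless, so return immediately when it appears
--     sensitive = False
--     for f in files:
--         if f == "docs/security/permissions_matrix.md":
--             return False
--         if not sensitive:
--             sensitive = (
--                 f.startswith("app/services/driver_compliance")
--                 or f.startswith("app/api/http_handlers.py")
--                 or "permissions" in f
--                 or "driver_documents" in f
--             )
--     return sensitive
-- ===== Notes on version B (the rewrite author's own statement) =====
-- stated objective: alternative
-- what changed: Replaces A's two separate any() passes with one explicit loop that early-returns False as soon as the permissions-matrix file is seen and otherwise accumulates the sensitive flag.
import Mathlib
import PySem

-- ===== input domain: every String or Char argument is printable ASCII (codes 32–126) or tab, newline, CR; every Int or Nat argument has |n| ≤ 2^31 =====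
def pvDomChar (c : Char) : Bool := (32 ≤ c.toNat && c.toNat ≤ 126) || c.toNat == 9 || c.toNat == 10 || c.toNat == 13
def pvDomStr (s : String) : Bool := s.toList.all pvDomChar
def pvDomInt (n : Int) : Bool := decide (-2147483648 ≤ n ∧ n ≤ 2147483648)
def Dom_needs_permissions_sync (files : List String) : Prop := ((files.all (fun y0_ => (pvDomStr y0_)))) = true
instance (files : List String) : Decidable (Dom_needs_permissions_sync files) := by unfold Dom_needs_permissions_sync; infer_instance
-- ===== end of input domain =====

-- ===== PORT A =====
-- A = B on all inputs; header: B fuses A's two any() scans into one loop with an early False return.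
def pvSensPred (f : String) : Bool :=
  PySem.Str.startswith f "app/services/driver_compliance"
  || PySem.Str.startswith f "app/api/http_handlers.py"
  || PySem.Str.isIn "permissions" f
  || PySem.Str.isIn "driver_documents" f

def needs_permissions_sync (files : List String) : Bool :=
  let sensitive := files.any (fun f => pvSensPred f)
  let touches_permissions := files.any (fun f => f == "docs/security/permissions_matrix.md")
  sensitive && !touches_permissions

-- ===== PORT B =====
def pvSyncLoop (files : List String) (sensitive : Bool) : Bool :=
  match files with
  | [] => sensitive
  | f :: rest =>
    if f == "docs/security/permissions_matrix.md" then false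
    else pvSyncLoop rest (if !sensitive then pvSensPred f else sensitive)

def needs_permissions_sync_alt (files : List String) : Bool :=
  pvSyncLoop files false

-- ===== PRECONDITION & SPEC =====
def Spec_needs_permissions_sync (files : List String) (out : Bool) : Prop := out = needs_permissions_sync_alt files
instance (files : List String) (out : Bool) : Decidable (Spec_needs_permissions_sync files out) := by unfold Spec_needs_permissions_sync; infer_instance

-- ===== CLAIM (what is proved, stated in full; the proofs are below) =====
def Claim_equal_needs_permissions_sync : Prop := ∀ (files : List String), Dom_needs_permissions_sync files → Spec_needs_permissions_sync files (needs_permissions_sync files)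

-- ===== LEMMAS AND PROOFS =====

-- ===== VERDICT (by name: the statement is the Claim_ definition above) =====
theorem pvSyncLoop_eq (files : List String) (s : Bool) :
    pvSyncLoop files s
      = ((s || files.any (fun f => pvSensPred f))
          && !(files.any (fun f => f == "docs/security/permissions_matrix.md"))) := by
  induction files generalizing s with
  | nil => simp [pvSyncLoop]
  | cons f rest ih =>
    by_cases h : f = "docs/security/permissions_matrix.md"
    · simp [pvSyncLoop, h]
    · have hb : (f == "docs/security/permissions_matrix.md") = false := by
        simp [h]
      simp only [pvSyncLoop, List.any_cons, hb, if_neg, Bool.false_eq_true,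
        not_false_eq_true, Bool.false_or]
      rw [ih]
      cases s <;> cases pvSensPred f <;> simp

theorem needs_permissions_sync_spec : Claim_equal_needs_permissions_sync := by
  intro files _
  unfold Spec_needs_permissions_sync needs_permissions_sync needs_permissions_sync_alt
  rw [pvSyncLoop_eq]
  simp
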